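-- pv_equiv track=rewrite | github.com/hodaketech/Journal_XAI_Pipeline | Connect6/BitBoard/game.py | _bitboard_has_n_in_row
-- ===== SOURCE A (Python) =====
-- def _bitboard_has_n_in_row(bb, width, height, n):
--     """Kiểm tra bitboard bb có n quân liên tiếp không (ngang, dọc, chéo, chéo ngược)"""
--     directions = [1, width, width+1, width-1]  # ngang, dọc, chéo xuôi, chéo ngược
--     for d in directions:
--         m = bb
--         for i in range(1, n):
--             m = m & (bb >> (d * i))
--         if m != 0:
--             return True
--     return False
-- ===== SOURCE B (Python) =====
-- def _bitboard_has_n_in_row(bb, width, height, n):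
--     """Doubling re-implementation: a run mask of length k is combined with a copy of
--     itself shifted by min(k, n-k) steps, so each direction needs O(log n) big-int ANDs
--     instead of A's n-1."""
--     for d in (1, width, width + 1, width - 1):
--         r = bb
--         k = 1
--         while k < n:
--             s = k if k + k <= n else n - k
--             r &= r >> (d * s)
--             k += s
--         if r != 0:
--             return True
--     return False
-- ===== Notes on version B (the rewrite author's own statement) =====
-- stated objective: faster
-- what changed: Replaces A's linear chain of n-1 shift-AND steps per direction by run-doubling (ANDing the current run mask with itself shifted by min(k, n-k)), needing only O(log n) big-int AND/shift operations per direction.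
-- outside the precondition, e.g. on _bitboard_has_n_in_row(3, -5, 1, 2): A returns True, B returns True
import Mathlib
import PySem

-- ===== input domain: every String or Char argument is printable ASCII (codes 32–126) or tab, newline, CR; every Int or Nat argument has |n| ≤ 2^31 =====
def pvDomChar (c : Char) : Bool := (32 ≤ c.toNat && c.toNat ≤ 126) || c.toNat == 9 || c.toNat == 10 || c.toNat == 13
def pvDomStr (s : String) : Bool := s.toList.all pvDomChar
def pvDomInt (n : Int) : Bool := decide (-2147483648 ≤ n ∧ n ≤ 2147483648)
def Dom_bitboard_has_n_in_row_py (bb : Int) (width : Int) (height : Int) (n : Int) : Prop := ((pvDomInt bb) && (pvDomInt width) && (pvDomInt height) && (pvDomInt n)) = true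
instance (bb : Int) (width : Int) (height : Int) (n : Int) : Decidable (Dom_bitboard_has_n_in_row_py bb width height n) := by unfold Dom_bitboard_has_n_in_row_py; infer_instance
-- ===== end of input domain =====

-- B replaces A's linear chain of shift-ANDs per direction by run-doubling; proved equal on all inputs where A does not raise.


-- ===== PORT A =====
-- literal port of A: for each direction d (in order), m := AND of bb >> (d*i) over i in range(1, n); first nonzero m returns True.
-- (the shift amount is written (d*i).toNat: inside Pre_ it is never negative; on a negative amount Python raises, which Pre_ excludes)
def bitboard_has_n_in_row_py (bb : Int) (width : Int) (height : Int) (n : Int) : Bool :=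
  [1, width, width + 1, width - 1].any (fun d =>
    ((PySem.List.pyRange 1 n 1).foldl (fun m i => PySem.Int.band m (bb >>> (d * i).toNat)) bb) != 0)

-- ===== PORT B =====
-- the while-loop of Source B: r is a run mask of length k; each pass ANDs r with itself shifted by d*s, s = min(k, n-k).
-- (the '1 ≤ k' conjunct of the guard only makes the recursion well-founded; the loop is entered with k = 1 and k only grows)
def pvAltWhile (bb : Int) (d : Int) (n : Int) (r : Int) (k : Int) : Int :=
  if _h : 1 ≤ k ∧ k < n then
    let s := if k + k ≤ n then k else n - k
    pvAltWhile bb d n (PySem.Int.band r (r >>> (d * s).toNat)) (k + s)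
  else r
termination_by (n - k).toNat
decreasing_by
  split <;> omega

def bitboard_has_n_in_row_py_alt (bb : Int) (width : Int) (height : Int) (n : Int) : Bool :=
  [1, width, width + 1, width - 1].any (fun d => pvAltWhile bb d n bb 1 != 0)

-- ===== PRECONDITION & SPEC =====
-- Pre_ excludes inputs with n ≥ 2 and width ≤ 0: there some direction d is negative and Python's bb >> (d*i)
-- raises ValueError (in A and in B alike) unless an earlier direction already returned True.
def Pre_bitboard_has_n_in_row_py (bb : Int) (width : Int) (height : Int) (n : Int) : Prop := 2 ≤ n → 1 ≤ width
instance (bb : Int) (width : Int) (height : Int) (n : Int) : Decidable (Pre_bitboard_has_n_in_row_py bb width height n) := by unfold Pre_bitboard_has_n_in_row_py; infer_instance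
def pvWitness_bitboard_has_n_in_row_py : Int × Int × Int × Int := (7, 3, 3, 2)
def Spec_bitboard_has_n_in_row_py (bb : Int) (width : Int) (height : Int) (n : Int) (out : Bool) : Prop := out = bitboard_has_n_in_row_py_alt bb width height n
instance (bb : Int) (width : Int) (height : Int) (n : Int) (out : Bool) : Decidable (Spec_bitboard_has_n_in_row_py bb width height n out) := by unfold Spec_bitboard_has_n_in_row_py; infer_instance

-- ===== CLAIM (what is proved, stated in full; the proofs are below) =====
def Claim_equal_bitboard_has_n_in_row_py : Prop := ∀ (bb : Int) (width : Int) (height : Int) (n : Int), Dom_bitboard_has_n_in_row_py bb width height n → Pre_bitboard_has_n_in_row_py bb width height n → Spec_bitboard_has_n_in_row_py bb width height n (bitboard_has_n_in_row_py bb width height n)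

-- ===== LEMMAS AND PROOFS =====

-- two integers with the same bits (in Python's infinite two's-complement reading) are equal
theorem pv_testBit_ext {a b : Int} (h : ∀ k, a.testBit k = b.testBit k) : a = b := by
  have key : ∀ (m n : Nat), (∀ k, (Int.ofNat m).testBit k = (Int.negSucc n).testBit k) → False := by
    intro m n hmn
    have h1 : m.testBit (m + n) = false := Nat.testBit_lt_two_pow (by
      calc m < 2 ^ m := Nat.lt_two_pow_self
        _ ≤ 2 ^ (m + n) := Nat.pow_le_pow_right (by omega) (by omega))
    have h2 : n.testBit (m + n) = false := Nat.testBit_lt_two_pow (by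
      calc n < 2 ^ n := Nat.lt_two_pow_self
        _ ≤ 2 ^ (m + n) := Nat.pow_le_pow_right (by omega) (by omega))
    have := hmn (m + n)
    simp [Int.testBit, h1, h2] at this
  cases a with
  | ofNat m =>
    cases b with
    | ofNat n =>
      have : m = n := Nat.eq_of_testBit_eq (fun i => by have := h i; simpa [Int.testBit] using this)
      simp [this]
    | negSucc n => exact absurd h (fun hh => key m n hh)
  | negSucc m =>
    cases b with
    | ofNat n => exact absurd (fun k => (h k).symm) (fun hh => key n m hh)
    | negSucc n =>
      have : m = n := Nat.eq_of_testBit_eq (fun i => by have := h i; simpa [Int.testBit] using this)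
      simp [this]

-- a submask x of m (x &&& m = x) and the rest of m add up to m
theorem pv_submask_add_xor (m : Nat) : ∀ x, x &&& m = x → x + (m ^^^ x) = m := by
  induction m using Nat.strong_induction_on with
  | _ m ih =>
    intro x hx
    rcases Nat.eq_zero_or_pos m with hm | hm
    · subst hm; simp at hx; simp [hx]
    · have h2 : x / 2 &&& m / 2 = x / 2 := by rw [← Nat.and_div_two, hx]
      have ih2 := ih (m / 2) (by omega) (x / 2) h2
      have hpar : x % 2 ≤ m % 2 := by
        have hb : (x &&& m) % 2 = x % 2 &&& m % 2 := by
          have := Nat.and_mod_two_pow (a := x) (b := m) (n := 1)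
          simpa [Nat.pow_one] using this
        rw [hx] at hb
        rcases Nat.mod_two_eq_zero_or_one x with h | h <;>
          rcases Nat.mod_two_eq_zero_or_one m with h' | h' <;>
            simp [h, h'] at hb ⊢
      have hxor : m ^^^ x = 2 * (m / 2 ^^^ x / 2) + (m + x) % 2 := by
        have e1 : (m ^^^ x) % 2 = (m + x) % 2 := Nat.xor_mod_two_eq
        have e2 : (m ^^^ x) / 2 = m / 2 ^^^ x / 2 := Nat.xor_div_two
        omega
      omega

theorem pv_sub_and (m n : Nat) : m - (m &&& n) = m ^^^ (m &&& n) := by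
  have hsub : (m &&& n) &&& m = m &&& n := by
    rw [Nat.and_comm (m &&& n) m, ← Nat.and_assoc, Nat.and_self]
  have := pv_submask_add_xor m (m &&& n) hsub
  omega

theorem pv_testBit_sub_and (m n k : Nat) :
    (m - (m &&& n)).testBit k = (m.testBit k && !(n.testBit k)) := by
  rw [pv_sub_and, Nat.testBit_xor, Nat.testBit_and]
  cases m.testBit k <;> cases n.testBit k <;> rfl

-- PySem.Int.band is bitwise AND, bit by bit
theorem pv_testBit_band (a b : Int) (k : Nat) :
    (PySem.Int.band a b).testBit k = (a.testBit k && b.testBit k) := by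
  cases a with
  | ofNat m =>
    cases b with
    | ofNat n =>
      have : PySem.Int.band (Int.ofNat m) (Int.ofNat n) = Int.ofNat (m &&& n) := by
        simp [PySem.Int.band]
      rw [this]; simp [Int.testBit, Nat.testBit_and]
    | negSucc n =>
      have : PySem.Int.band (Int.ofNat m) (Int.negSucc n) = Int.ofNat (m - (m &&& n)) := by
        simp [PySem.Int.band, Int.negSucc_not_nonneg]
      rw [this]; simp [Int.testBit, pv_testBit_sub_and]
  | negSucc m =>
    cases b with
    | ofNat n =>
      have : PySem.Int.band (Int.negSucc m) (Int.ofNat n) = Int.ofNat (n - (n &&& m)) := by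
        simp [PySem.Int.band, Int.negSucc_not_nonneg]
      rw [this]; simp [Int.testBit, pv_testBit_sub_and]
      cases (Nat.testBit n k) <;> cases (Nat.testBit m k) <;> rfl
    | negSucc n =>
      have : PySem.Int.band (Int.negSucc m) (Int.negSucc n) = Int.negSucc (m ||| n) := by
        simp [PySem.Int.band, Int.negSucc_not_nonneg]
        rw [Int.negSucc_eq]; ring
      rw [this]; simp [Int.testBit, Nat.testBit_or]

-- arithmetic right shift, bit by bit
theorem pv_testBit_shr (a : Int) (p k : Nat) : (a >>> p).testBit k = a.testBit (p + k) := by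
  cases a with
  | ofNat m =>
    show (Int.ofNat (m >>> p)).testBit k = (Int.ofNat m).testBit (p + k)
    simp [Int.testBit, Nat.testBit_shiftRight]
  | negSucc m =>
    show (Int.negSucc (m >>> p)).testBit k = (Int.negSucc m).testBit (p + k)
    simp [Int.testBit, Nat.testBit_shiftRight]

-- the AND of bb with its first j shifted copies (shift unit D): the value both loops compute
def pvSpec (bb : Int) (D : Nat) : Nat → Int
  | 0 => bb
  | j + 1 => PySem.Int.band (pvSpec bb D j) (bb >>> (D * (j + 1)))

theorem pv_testBit_spec (bb : Int) (D : Nat) (j i : Nat) :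
    (pvSpec bb D j).testBit i = decide (∀ t, t ≤ j → bb.testBit (i + D * t) = true) := by
  induction j with
  | zero =>
    simp only [pvSpec, Nat.le_zero, forall_eq]
    simp
  | succ j ih =>
    rw [pvSpec, pv_testBit_band, ih, pv_testBit_shr]
    rw [show (decide (∀ t ≤ j, bb.testBit (i + D * t) = true) &&
          bb.testBit (D * (j + 1) + i)) =
        decide ((∀ t ≤ j, bb.testBit (i + D * t) = true) ∧
          bb.testBit (D * (j + 1) + i) = true) from by
      cases hq : bb.testBit (D * (j + 1) + i) <;> simp_all]
    rw [decide_eq_decide]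
    constructor
    · rintro ⟨h1, h2⟩ t ht
      rcases Nat.lt_or_ge t (j + 1) with h | h
      · exact h1 t (by omega)
      · have : t = j + 1 := by omega
        subst this
        rw [show i + D * (j + 1) = D * (j + 1) + i from by omega]
        exact h2
    · intro hall
      refine ⟨fun t ht => hall t (by omega), ?_⟩
      rw [show D * (j + 1) + i = i + D * (j + 1) from by omega]
      exact hall (j + 1) (by omega)

-- the doubling step: a run mask ANDed with itself shifted by s ≤ k steps is the run mask of length k + s
theorem pv_combine (bb : Int) (D s K : Nat) (hs : s ≤ K + 1) :
    PySem.Int.band (pvSpec bb D K) ((pvSpec bb D K) >>> (D * s)) = pvSpec bb D (K + s) := by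
  apply pv_testBit_ext
  intro i
  rw [pv_testBit_band, pv_testBit_shr, pv_testBit_spec, pv_testBit_spec, pv_testBit_spec]
  rw [show (decide (∀ t ≤ K, bb.testBit (i + D * t) = true) &&
        decide (∀ t ≤ K, bb.testBit (D * s + i + D * t) = true)) =
      decide ((∀ t ≤ K, bb.testBit (i + D * t) = true) ∧
        (∀ t ≤ K, bb.testBit (D * s + i + D * t) = true)) from by simp]
  rw [decide_eq_decide]
  constructor
  · rintro ⟨h1, h2⟩ t ht
    rcases Nat.lt_or_ge t s with h | h
    · exact h1 t (by omega)
    · have e : D * s + D * (t - s) = D * t := by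
        rw [← Nat.mul_add]; congr 1; omega
      have := h2 (t - s) (by omega)
      rw [show D * s + i + D * (t - s) = i + (D * s + D * (t - s)) from by omega, e] at this
      exact this
  · intro hall
    refine ⟨fun t ht => hall t (by omega), fun t ht => ?_⟩
    have := hall (s + t) (by omega)
    rw [show i + D * (s + t) = D * s + i + D * t from by rw [Nat.mul_add]; omega] at this
    exact this

theorem pv_toNat_mul (d i : Int) (hd : 0 ≤ d) (hi : 0 ≤ i) :
    (d * i).toNat = d.toNat * i.toNat := by
  obtain ⟨m, rfl⟩ := Int.eq_ofNat_of_zero_le hd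
  obtain ⟨p, rfl⟩ := Int.eq_ofNat_of_zero_le hi
  norm_cast

-- A's inner loop computes the run mask of length n
theorem pv_foldA (bb d n : Int) (hd : 0 ≤ d) :
    (PySem.List.pyRange 1 n 1).foldl (fun m i => PySem.Int.band m (bb >>> (d * i).toNat)) bb
      = pvSpec bb d.toNat (n - 1).toNat := by
  rw [PySem.List.pyRange_one]
  generalize (n - 1).toNat = N
  induction N with
  | zero => simp [pvSpec]
  | succ N ih =>
    rw [List.range_succ, List.map_append, List.foldl_append, ih]
    simp only [List.map_cons, List.map_nil, List.foldl_cons, List.foldl_nil]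
    rw [pvSpec]
    congr 1
    congr 1
    rw [pv_toNat_mul d (1 + (N : Int)) hd (by omega)]
    congr 1
    omega

-- B's while-loop, started on the run mask of length k, ends on the run mask of length n
theorem pv_altWhile_eq (bb d n : Int) (hd : 0 ≤ d) :
    ∀ k : Int, 1 ≤ k → k ≤ n →
      pvAltWhile bb d n (pvSpec bb d.toNat (k - 1).toNat) k = pvSpec bb d.toNat (n - 1).toNat := by
  intro k hk hkn
  induction hfuel : (n - k).toNat using Nat.strong_induction_on generalizing k with
  | _ fuel ih =>
    rw [pvAltWhile]
    by_cases hlt : k < n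
    · rw [dif_pos ⟨hk, hlt⟩]
      set s : Int := if k + k ≤ n then k else n - k with hs
      have hs1 : 1 ≤ s := by rw [hs]; split <;> omega
      have hsk : s ≤ k := by rw [hs]; split <;> omega
      have hksn : k + s ≤ n := by rw [hs]; split <;> omega
      have hmul : (d * s).toNat = d.toNat * s.toNat := pv_toNat_mul d s hd (by omega)
      have hcomb := pv_combine bb d.toNat s.toNat (k - 1).toNat (by omega)
      show pvAltWhile bb d n
        (PySem.Int.band (pvSpec bb d.toNat (k - 1).toNat)
          (pvSpec bb d.toNat (k - 1).toNat >>> (d * s).toNat)) (k + s) = pvSpec bb d.toNat (n - 1).toNat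
      rw [hmul, hcomb]
      have harg : (k - 1).toNat + s.toNat = (k + s - 1).toNat := by omega
      rw [harg]
      exact ih ((n - (k + s)).toNat) (by omega) (k + s) (by omega) (by omega) rfl
    · rw [dif_neg (by omega)]
      have : k = n := by omega
      subst this
      rfl

-- per direction: A's linear loop and B's doubling loop agree (d ≥ 0, or n ≤ 1 where neither shifts)
theorem pv_dir_eq (bb d n : Int) (h : 0 ≤ d ∨ n ≤ 1) :
    (PySem.List.pyRange 1 n 1).foldl (fun m i => PySem.Int.band m (bb >>> (d * i).toNat)) bb
      = pvAltWhile bb d n bb 1 := by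
  by_cases hn : n ≤ 1
  · rw [PySem.List.pyRange_one]
    rw [show (n - 1).toNat = 0 from by omega]
    rw [pvAltWhile, dif_neg (by omega)]
    rfl
  · have hd : 0 ≤ d := by
      rcases h with h | h
      · exact h
      · omega
    rw [pv_foldA bb d n hd]
    have h0 : pvSpec bb d.toNat ((1 : Int) - 1).toNat = bb := rfl
    have h1 := pv_altWhile_eq bb d n hd 1 (by omega) (by omega)
    rw [h0] at h1
    exact h1.symm

-- ===== VERDICT (by name: the statement is the Claim_ definition above) =====
theorem bitboard_has_n_in_row_py_spec : Claim_equal_bitboard_has_n_in_row_py := by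
  intro bb width height n _ hpre
  unfold Spec_bitboard_has_n_in_row_py
  unfold bitboard_has_n_in_row_py bitboard_has_n_in_row_py_alt
  simp only [List.any_cons, List.any_nil]
  by_cases hn : n ≤ 1
  · rw [pv_dir_eq bb 1 n (Or.inr hn), pv_dir_eq bb width n (Or.inr hn),
      pv_dir_eq bb (width + 1) n (Or.inr hn), pv_dir_eq bb (width - 1) n (Or.inr hn)]
  · have hw : 1 ≤ width := hpre (by omega)
    rw [pv_dir_eq bb 1 n (Or.inl (by omega)), pv_dir_eq bb width n (Or.inl (by omega)),
      pv_dir_eq bb (width + 1) n (Or.inl (by omega)), pv_dir_eq bb (width - 1) n (Or.inl (by omega))]
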